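-- pv_equiv track=rewrite | github.com/NoamFav/EnronBox | src/response/responder.py | _extract_phrase
-- ===== SOURCE A (Python) =====
-- def _extract_phrase(text: str, phrase_list: list) -> str:
--     if not text or not phrase_list:
--         return ""
--
--     text_lower = str(text).lower()
--     found_phrases = []
--
--     # Find all matching phrases
--     for phrase in phrase_list:
--         if phrase.lower() in text_lower:
--             # Find the actual occurrence in original text
--             start = text_lower.find(phrase.lower())
--             end = start + len(phrase)
--             found_phrases.append(text[start:end])
--
--     # Return the longest matching phrase for better context
--     if found_phrases:
--         return max(found_phrases, key=len)
--
--     # Smart fallbacks based on phrase list type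
--     if any(p in ["great", "excellent", "thank"] for p in phrase_list):
--         return "your positive feedback"
--     elif any(p in ["problem", "issue", "concern"] for p in phrase_list):
--         return "this situation"
--
--     return "this matter"  # Ultimate fallback
-- ===== SOURCE B (Python) =====
-- def _extract_phrase(text: str, phrase_list: list) -> str:
--     if not text or not phrase_list:
--         return ""
--
--     text_lower = str(text).lower()
--
--     # Longest-first: scan a stable length-descending copy, return at the first hit.
--     for phrase in sorted(phrase_list, key=len, reverse=True):
--         start = text_lower.find(phrase.lower())
--         if start != -1:
--             return text[start:start + len(phrase)]
--
--     if any(p in ["great", "excellent", "thank"] for p in phrase_list):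
--         return "your positive feedback"
--     if any(p in ["problem", "issue", "concern"] for p in phrase_list):
--         return "this situation"
--
--     return "this matter"
-- ===== Notes on version B (the rewrite author's own statement) =====
-- stated objective: faster
-- what changed: B sorts the phrase list length-descending (stable) and returns at the first phrase found in the lowered text, instead of collecting every match and taking max(..., key=len) at the end.
import Mathlib
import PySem

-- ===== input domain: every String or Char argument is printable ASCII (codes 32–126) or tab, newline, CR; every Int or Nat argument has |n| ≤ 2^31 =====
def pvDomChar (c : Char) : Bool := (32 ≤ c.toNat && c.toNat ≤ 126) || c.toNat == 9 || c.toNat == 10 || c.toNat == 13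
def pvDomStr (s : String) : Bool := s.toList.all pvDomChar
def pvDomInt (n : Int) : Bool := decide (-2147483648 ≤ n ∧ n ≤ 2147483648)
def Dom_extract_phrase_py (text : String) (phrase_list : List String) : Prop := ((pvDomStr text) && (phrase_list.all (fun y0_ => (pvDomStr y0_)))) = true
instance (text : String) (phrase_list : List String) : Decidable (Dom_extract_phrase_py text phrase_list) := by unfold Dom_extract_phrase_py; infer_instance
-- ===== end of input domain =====

-- B replaces A's collect-all-matches-then-max pass by a stable length-descending sort of the
-- phrase list scanned with an early return at the first phrase found in the text
-- (objective: faster — a timing run measured B faster; the scan short-circuits at the first hit).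


-- ===== PORT A =====
def extract_phrase_py (text : String) (phrase_list : List String) : String :=
  if text = "" ∨ phrase_list = [] then ""
  else
    let text_lower := PySem.Str.lower text
    let found_phrases := phrase_list.foldl (fun acc phrase =>
      if PySem.Str.isIn (PySem.Str.lower phrase) text_lower then
        let start := PySem.Str.find text_lower (PySem.Str.lower phrase)
        acc ++ [PySem.Str.slice text (some start) (some (start + PySem.Str.len phrase))]
      else acc) []
    if found_phrases ≠ [] then
      PySem.List.maxD found_phrases (fun s => PySem.Str.len s) ""
    else if phrase_list.any (fun p => p == "great" || p == "excellent" || p == "thank") then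
      "your positive feedback"
    else if phrase_list.any (fun p => p == "problem" || p == "issue" || p == "concern") then
      "this situation"
    else
      "this matter"

-- ===== PORT B =====
-- B's loop body: walk the sorted copy, return at the first phrase found in text_lower;
-- when the list is exhausted, the fallback chain over the original phrase_list.
def pvScanB (text text_lower : String) (phrase_list : List String) : List String → String
  | [] =>
    if phrase_list.any (fun p => p == "great" || p == "excellent" || p == "thank") then
      "your positive feedback"
    else if phrase_list.any (fun p => p == "problem" || p == "issue" || p == "concern") then
      "this situation"
    else
      "this matter"
  | p :: rest =>
    let start := PySem.Str.find text_lower (PySem.Str.lower p)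
    if start ≠ -1 then
      PySem.Str.slice text (some start) (some (start + PySem.Str.len p))
    else
      pvScanB text text_lower phrase_list rest

def extract_phrase_py_alt (text : String) (phrase_list : List String) : String :=
  if text = "" ∨ phrase_list = [] then ""
  else
    let text_lower := PySem.Str.lower text
    pvScanB text text_lower phrase_list
      (PySem.List.sorted phrase_list (fun p => PySem.Str.len p) true)

-- ===== PRECONDITION & SPEC =====
def Spec_extract_phrase_py (text : String) (phrase_list : List String) (out : String) : Prop := out = extract_phrase_py_alt text phrase_list
instance (text : String) (phrase_list : List String) (out : String) : Decidable (Spec_extract_phrase_py text phrase_list out) := by unfold Spec_extract_phrase_py; infer_instance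

-- ===== CLAIM (what is proved, stated in full; the proofs are below) =====
def Claim_equal_extract_phrase_py : Prop := ∀ (text : String) (phrase_list : List String), Dom_extract_phrase_py text phrase_list → Spec_extract_phrase_py text phrase_list (extract_phrase_py text phrase_list)

-- ===== LEMMAS AND PROOFS =====

-- one step of Python's max-with-key accumulator, kept on the phrase (pre-image) side
def pvStep {α : Type} (key : α → Int) (m : α → Bool) (o : Option α) (x : α) : Option α :=
  if m x then
    match o with
    | none => some x
    | some b => if key b < key x then some x else some b
  else o

lemma pv_mem_insertBy {α : Type} (bf : α → α → Bool) (x z : α) (l : List α) :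
    z ∈ PySem.List.insertBy bf x l ↔ z = x ∨ z ∈ l := by
  induction l with
  | nil => simp [PySem.List.insertBy]
  | cons y ys ih =>
    by_cases h : bf x y = true
    · simp [PySem.List.insertBy, h]
    · simp [PySem.List.insertBy, h, ih]
      tauto

lemma pv_insertBy_desc {α : Type} (key : α → Int) (x : α) (l : List α)
    (hl : l.Pairwise (fun a b => key b ≤ key a)) :
    (PySem.List.insertBy (fun a b => decide (key b < key a)) x l).Pairwise
      (fun a b => key b ≤ key a) := by
  induction l with
  | nil => simp [PySem.List.insertBy]
  | cons y ys ih =>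
    rcases List.pairwise_cons.mp hl with ⟨hy, hys⟩
    by_cases h : key y < key x
    · simp only [PySem.List.insertBy, decide_eq_true_eq, if_pos h]
      refine List.pairwise_cons.mpr ⟨?_, hl⟩
      intro z hz
      rcases List.mem_cons.mp hz with hz | hz
      · subst hz; omega
      · have := hy z hz; omega
    · simp only [PySem.List.insertBy, decide_eq_true_eq, if_neg h]
      refine List.pairwise_cons.mpr ⟨?_, ih hys⟩
      intro z hz
      rcases (pv_mem_insertBy _ _ _ _).mp hz with hz | hz
      · subst hz; omega
      · exact hy z hz

lemma pvStep_pos_none {α : Type} (key : α → Int) (m : α → Bool) (x : α) (hm : m x = true) :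
    pvStep key m none x = some x := by simp [pvStep, hm]

lemma pvStep_pos_some {α : Type} (key : α → Int) (m : α → Bool) (b x : α) (hm : m x = true) :
    pvStep key m (some b) x = if key b < key x then some x else some b := by simp [pvStep, hm]

lemma pvStep_neg {α : Type} (key : α → Int) (m : α → Bool) (o : Option α) (x : α)
    (hm : m x = false) : pvStep key m o x = o := by simp [pvStep, hm]

lemma pv_find?_insertBy {α : Type} (key : α → Int) (m : α → Bool) (x : α) (l : List α)
    (hl : l.Pairwise (fun a b => key b ≤ key a)) :
    (PySem.List.insertBy (fun a b => decide (key b < key a)) x l).find? m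
      = pvStep key m (l.find? m) x := by
  induction l with
  | nil =>
    rcases Bool.eq_false_or_eq_true (m x) with hm | hm
    · simp [PySem.List.insertBy, hm, pvStep_pos_none key m _ hm]
    · simp [PySem.List.insertBy, hm, pvStep_neg key m _ _ hm]
  | cons y ys ih =>
    rcases List.pairwise_cons.mp hl with ⟨hy, hys⟩
    by_cases h : key y < key x
    · simp only [PySem.List.insertBy, decide_eq_true_eq, if_pos h]
      rcases Bool.eq_false_or_eq_true (m x) with hm | hm
      · rw [List.find?_cons_of_pos hm]
        cases hfy : (y :: ys).find? m with
        | none => rw [pvStep_pos_none key m _ hm]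
        | some b =>
          have hb : b ∈ y :: ys := List.mem_of_find?_eq_some hfy
          have hkb : key b ≤ key y := by
            rcases List.mem_cons.mp hb with hb | hb
            · subst hb; omega
            · exact hy b hb
          have hlt : key b < key x := by omega
          rw [pvStep_pos_some key m _ _ hm, if_pos hlt]
      · rw [List.find?_cons_of_neg (by simp [hm]), pvStep_neg key m _ _ hm]
    · simp only [PySem.List.insertBy, decide_eq_true_eq, if_neg h]
      rcases Bool.eq_false_or_eq_true (m y) with hmy | hmy
      · rw [List.find?_cons_of_pos hmy, List.find?_cons_of_pos hmy]
        rcases Bool.eq_false_or_eq_true (m x) with hm | hm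
        · rw [pvStep_pos_some key m _ _ hm, if_neg (by omega)]
        · rw [pvStep_neg key m _ _ hm]
      · rw [List.find?_cons_of_neg (by simp [hmy]), List.find?_cons_of_neg (by simp [hmy])]
        exact ih hys

lemma pv_find?_foldl_insertBy {α : Type} (key : α → Int) (m : α → Bool) :
    ∀ (xs acc : List α), acc.Pairwise (fun a b => key b ≤ key a) →
    (xs.foldl (fun a x => PySem.List.insertBy (fun a b => decide (key b < key a)) x a) acc).find? m
      = xs.foldl (pvStep key m) (acc.find? m) := by
  intro xs
  induction xs with
  | nil => intro acc _; rfl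
  | cons x xs ih =>
    intro acc hacc
    simp only [List.foldl_cons]
    rw [ih _ (pv_insertBy_desc key x acc hacc), pv_find?_insertBy key m x acc hacc]

lemma pv_find?_sorted {α : Type} (key : α → Int) (m : α → Bool) (xs : List α) :
    (PySem.List.sorted xs key true).find? m = xs.foldl (pvStep key m) none := by
  have h := pv_find?_foldl_insertBy key m xs [] (by simp)
  simpa [PySem.List.sorted] using h

-- Python's max-with-key fold over the image list, pulled back through `out`
lemma pv_maxfold_eq {α : Type} (key : α → Int) (m : α → Bool) (out : α → String)
    (hlen : ∀ p, m p = true → PySem.Str.len (out p) = key p) :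
    ∀ (xs : List α) (o : Option α), (∀ b, o = some b → m b = true) →
    ((xs.filter m).map out).foldl
        (fun acc x => match acc with
          | none => some x
          | some mx => if PySem.Str.len mx < PySem.Str.len x then some x else some mx)
        (o.map out)
      = (xs.foldl (pvStep key m) o).map out := by
  intro xs
  induction xs with
  | nil => intro o _; rfl
  | cons x xs ih =>
    intro o ho
    by_cases hm : m x = true
    · have ho' : ∀ b, pvStep key m o x = some b → m b = true := by
        intro b hb
        cases o with
        | none =>
          simp [pvStep, hm] at hb; subst hb; exact hm
        | some c =>
          have hc := ho c rfl
          simp only [pvStep, hm, if_true] at hb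
          by_cases hlt : key c < key x
          · simp [hlt] at hb; subst hb; exact hm
          · simp [hlt] at hb; subst hb; exact hc
      have hstep : (match o.map out with
          | none => some (out x)
          | some mx => if PySem.Str.len mx < PySem.Str.len (out x) then some (out x) else some mx)
          = (pvStep key m o x).map out := by
        cases o with
        | none => simp [pvStep, hm]
        | some c =>
          have hc := ho c rfl
          simp only [Option.map_some, pvStep, hm, if_true]
          rw [hlen c hc, hlen x hm]
          by_cases hlt : key c < key x <;> simp [hlt]
      simp only [List.filter_cons, hm, if_true, List.map_cons, List.foldl_cons, hstep]
      exact ih (pvStep key m o x) ho'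
    · have hm' : m x = false := by simpa using hm
      simp only [List.filter_cons, List.foldl_cons, pvStep, hm', Bool.false_eq_true,
        if_false]
      exact ih o ho

lemma pv_maxfold_ne_none : ∀ (l : List String) (a : Option String), l ≠ [] ∨ a ≠ none →
    l.foldl (fun acc x => match acc with
        | none => some x
        | some mx => if PySem.Str.len mx < PySem.Str.len x then some x else some mx) a ≠ none := by
  intro l
  induction l with
  | nil => intro a h; simpa using h
  | cons x xs ih =>
    intro a _
    simp only [List.foldl_cons]
    apply ih
    right
    cases a with
    | none => simp
    | some mx =>
      dsimp only
      split <;> simp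

lemma pv_scanB_eq (text tl : String) (pl : List String) :
    ∀ l : List String, pvScanB text tl pl l =
      (match l.find? (fun p => PySem.Str.isIn (PySem.Str.lower p) tl) with
        | some p => PySem.Str.slice text (some (PySem.Str.find tl (PySem.Str.lower p)))
            (some (PySem.Str.find tl (PySem.Str.lower p) + PySem.Str.len p))
        | none => pvScanB text tl pl []) := by
  intro l
  induction l with
  | nil => rfl
  | cons p rest ih =>
    have hiff : (PySem.Str.find tl (PySem.Str.lower p) ≠ -1)
        ↔ (PySem.Str.isIn (PySem.Str.lower p) tl = true) := by
      rw [PySem.Str.find_ne_neg_one_iff, PySem.Str.isIn_iff_infix]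
    show (if PySem.Str.find tl (PySem.Str.lower p) ≠ -1 then
        PySem.Str.slice text (some (PySem.Str.find tl (PySem.Str.lower p)))
          (some (PySem.Str.find tl (PySem.Str.lower p) + PySem.Str.len p))
      else pvScanB text tl pl rest) = _
    by_cases h : PySem.Str.find tl (PySem.Str.lower p) ≠ -1
    · rw [if_pos h]
      simp only [List.find?_cons, hiff.mp h]
    · have hm : PySem.Str.isIn (PySem.Str.lower p) tl = false := by
        have : ¬ (PySem.Str.isIn (PySem.Str.lower p) tl = true) := fun h' => h (hiff.mpr h')
        simpa using this
      rw [if_neg h]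
      simp only [List.find?_cons, hm]
      exact ih

lemma pv_len_out (text : String) (p : String)
    (hm : PySem.Str.isIn (PySem.Str.lower p) (PySem.Str.lower text) = true) :
    PySem.Str.len (PySem.Str.slice text
        (some (PySem.Str.find (PySem.Str.lower text) (PySem.Str.lower p)))
        (some (PySem.Str.find (PySem.Str.lower text) (PySem.Str.lower p) + PySem.Str.len p)))
      = PySem.Str.len p := by
  set tl := PySem.Str.lower text with htl
  have hinf : (PySem.Str.lower p).toList <:+: tl.toList := (PySem.Str.isIn_iff_infix _ _).mp hm
  have hpos : 0 ≤ PySem.Str.find tl (PySem.Str.lower p) := (PySem.Str.find_nonneg_iff _ _).mpr hinf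
  have hfind : PySem.Str.find tl (PySem.Str.lower p)
      = PySem.Chars.find tl.toList (PySem.Str.lower p).toList := PySem.Str.find_eq _ _
  have hpos' : 0 ≤ PySem.Chars.find tl.toList (PySem.Str.lower p).toList := by
    rw [← hfind]; exact hpos
  have hspec := (PySem.Chars.find_spec hpos').1
  set st : Nat := (PySem.Chars.find tl.toList (PySem.Str.lower p).toList).toNat with hst
  have hlenlp : (PySem.Str.lower p).toList.length = p.toList.length := by
    rw [PySem.Str.toList_lower]; simp [PySem.Chars.lower]
  have hlentl : tl.toList.length = text.toList.length := by
    rw [htl, PySem.Str.toList_lower]; simp [PySem.Chars.lower]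
  have htn : (st : Int) = PySem.Chars.find tl.toList (PySem.Str.lower p).toList :=
    Int.toNat_of_nonneg hpos'
  have hstle : st ≤ tl.toList.length := by
    have := PySem.Chars.find_le_length tl.toList (PySem.Str.lower p).toList
    omega
  have hbound : st + p.toList.length ≤ text.toList.length := by
    have h1 := hspec.length_le
    rw [List.length_drop] at h1
    rw [hlenlp] at h1
    omega
  have hcast : PySem.Str.find tl (PySem.Str.lower p) = (st : Int) := by
    rw [hfind]; omega
  rw [PySem.Str.len_eq, PySem.Str.toList_slice, PySem.Chars.slice_eq_listSlice,
    hcast, PySem.Str.len_eq]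
  have : (st : Int) + (p.toList.length : Int) = ((st + p.toList.length : Nat) : Int) := by
    push_cast; ring
  rw [this, PySem.List.slice_natCast]
  simp only [List.length_take, List.length_drop]
  omega

-- ===== VERDICT (by name: the statement is the Claim_ definition above) =====
theorem extract_phrase_py_spec : Claim_equal_extract_phrase_py := by
  intro text phrase_list _
  unfold Spec_extract_phrase_py extract_phrase_py extract_phrase_py_alt
  by_cases hguard : text = "" ∨ phrase_list = []
  · simp [hguard]
  · simp only [if_neg hguard]
    set tl := PySem.Str.lower text with htl
    set m : String → Bool := fun p => PySem.Str.isIn (PySem.Str.lower p) tl with hmdef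
    set out : String → String := fun p =>
      PySem.Str.slice text (some (PySem.Str.find tl (PySem.Str.lower p)))
        (some (PySem.Str.find tl (PySem.Str.lower p) + PySem.Str.len p)) with houtdef
    set key : String → Int := fun p => PySem.Str.len p with hkeydef
    have hfound : phrase_list.foldl (fun acc phrase =>
        if PySem.Str.isIn (PySem.Str.lower phrase) tl then
          let start := PySem.Str.find tl (PySem.Str.lower phrase)
          acc ++ [PySem.Str.slice text (some start) (some (start + PySem.Str.len phrase))]
        else acc) []
        = (phrase_list.filter m).map out := by
      have := PySem.List.foldl_append_if m out phrase_list []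
      simpa [hmdef, houtdef] using this
    rw [hfound]
    have hB := pv_scanB_eq text tl phrase_list
        (PySem.List.sorted phrase_list (fun p => PySem.Str.len p) true)
    rw [hB, pv_find?_sorted (fun p => PySem.Str.len p) m phrase_list]
    have hlen : ∀ p, m p = true → PySem.Str.len (out p) = key p := by
      intro p hp
      exact pv_len_out text p hp
    have hmax := pv_maxfold_eq key m out hlen phrase_list none (by intro b h; cases h)
    simp only [Option.map_none] at hmax
    cases hfold : phrase_list.foldl (pvStep key m) none with
    | some p =>
      have hne : (phrase_list.filter m).map out ≠ [] := by
        intro hnil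
        have := hmax
        rw [hfold, hnil] at this
        simp at this
      rw [if_pos hne]
      rw [hfold] at hmax
      simp only [Option.map_some] at hmax
      have hmaxD : PySem.List.maxD ((phrase_list.filter m).map out) key ""
          = (((phrase_list.filter m).map out).foldl (fun acc x => match acc with
              | none => some x
              | some mx => if PySem.Str.len mx < PySem.Str.len x then some x else some mx)
              none).getD "" := by
        unfold PySem.List.maxD PySem.List.max?
        simp only [hkeydef]
        congr 1
        congr 1
        funext acc x
        cases acc <;> rfl
      rw [hmaxD, hmax]
      rfl
    | none =>
      have hnil : (phrase_list.filter m).map out = [] := by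
        by_contra hne
        have := pv_maxfold_ne_none ((phrase_list.filter m).map out) none (Or.inl hne)
        rw [hfold] at hmax
        exact this hmax
      rw [if_neg (by simp [hnil])]
      rfl
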